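-- pv_equiv track=rewrite | github.com/rdtr/leetcode_solutions | python/0616_add_bold_tag_in_string.py | check
-- ===== SOURCE A (Python) =====
-- def check(s, i, dict):
--     length = 0
--     res = ''
--     for word in dict:
--         if i + len(word) - 1 >= len(s):
--             continue
--         if s[i:i + len(word)] == word:
--             if len(word) > length:
--                 length = len(word)
--                 res = word
--
--     if not res:
--         return '', False
--     return res, True
-- ===== SOURCE B (Python) =====
-- def check(s, i, dict):
--     words = set(dict)
--     lengths = sorted({len(w) for w in words if w}, reverse=True)
--     for L in lengths:
--         if i + L - 1 < len(s):
--             seg = s[i:i + L]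
--             if len(seg) == L and seg in words:
--                 return seg, True
--     return '', False
-- ===== Notes on version B (the rewrite author's own statement) =====
-- stated objective: alternative
-- what changed: B replaces A's scan over every dictionary word (slicing and comparing per word) by building a hash set of the words once, collecting the distinct word lengths, and probing s at position i only once per distinct length in descending order, returning at the first hit.
import Mathlib
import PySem

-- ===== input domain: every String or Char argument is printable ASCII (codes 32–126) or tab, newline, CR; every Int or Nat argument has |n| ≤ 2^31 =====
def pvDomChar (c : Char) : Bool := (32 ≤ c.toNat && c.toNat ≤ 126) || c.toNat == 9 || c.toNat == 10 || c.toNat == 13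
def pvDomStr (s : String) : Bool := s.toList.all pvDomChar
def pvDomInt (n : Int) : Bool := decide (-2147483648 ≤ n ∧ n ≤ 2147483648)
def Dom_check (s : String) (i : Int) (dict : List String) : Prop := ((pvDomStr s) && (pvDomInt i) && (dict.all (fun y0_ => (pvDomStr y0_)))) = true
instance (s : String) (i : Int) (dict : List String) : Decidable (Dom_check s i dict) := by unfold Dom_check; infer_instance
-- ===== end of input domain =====

-- B replaces A's per-word scan by a word set plus one slice probe per distinct word length,
-- longest length first (objective: alternative; exact same return value).

-- ===== PORT A =====
def check (s : String) (i : Int) (dict : List String) : String × Bool :=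
  let st := dict.foldl (fun (acc : Int × String) word =>
    if i + PySem.Str.len word - 1 ≥ PySem.Str.len s then acc
    else if PySem.Str.slice s (some i) (some (i + PySem.Str.len word)) == word then
      (if PySem.Str.len word > acc.1 then (PySem.Str.len word, word) else acc)
    else acc) (0, "")
  if st.2 == "" then ("", false) else (st.2, true)

-- ===== PORT B =====
-- B-side helper: the 'for L in lengths: … return' loop of Source B.
def checkAltLoop (s : String) (i : Int) (words : PySem.Set String) : List Int → String × Bool
  | [] => ("", false)
  | L :: rest =>
    if i + L - 1 < PySem.Str.len s then
      let seg := PySem.Str.slice s (some i) (some (i + L))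
      if PySem.Str.len seg == L && PySem.Set.contains words seg then (seg, true)
      else checkAltLoop s i words rest
    else checkAltLoop s i words rest

def check_alt (s : String) (i : Int) (dict : List String) : String × Bool :=
  let words : PySem.Set String := PySem.Set.ofList dict
  let lengths : List Int :=
    PySem.List.sorted (PySem.Set.ofList ((words.filter (fun w => !(w == ""))).map PySem.Str.len)) (fun x => x) true
  checkAltLoop s i words lengths

-- ===== PRECONDITION & SPEC =====
def Spec_check (s : String) (i : Int) (dict : List String) (out : String × Bool) : Prop := out = check_alt s i dict
instance (s : String) (i : Int) (dict : List String) (out : String × Bool) : Decidable (Spec_check s i dict out) := by unfold Spec_check; infer_instance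

-- ===== CLAIM (what is proved, stated in full; the proofs are below) =====
def Claim_equal_check : Prop := ∀ (s : String) (i : Int) (dict : List String), Dom_check s i dict → Spec_check s i dict (check s i dict)

-- ===== LEMMAS AND PROOFS =====

/-- `s[i:i+L]` -/
def pvSl (s : String) (i L : Int) : String := PySem.Str.slice s (some i) (some (i + L))

/-- A's match condition for a word `w`: the guard passes and the slice equals `w`. -/
def pvMb (s : String) (i : Int) (w : String) : Bool :=
  !decide (i + PySem.Str.len w - 1 ≥ PySem.Str.len s) && (pvSl s i (PySem.Str.len w) == w)

/-- Lengths of the matching words of `dict`. -/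
def pvLens (s : String) (i : Int) (dict : List String) : List Int :=
  (dict.filter (pvMb s i)).map PySem.Str.len

/-- Longest matching length (0 if none). -/
def pvM (s : String) (i : Int) (dict : List String) : Int :=
  (pvLens s i dict).foldl max 0

/-- Common reference value of both programs. -/
def pvRef (s : String) (i : Int) (dict : List String) : String × Bool :=
  if pvM s i dict ≤ 0 then ("", false) else (pvSl s i (pvM s i dict), true)

lemma pvM_mem_or (s : String) (i : Int) (dict : List String) :
    pvM s i dict = 0 ∨ pvM s i dict ∈ pvLens s i dict :=
  PySem.List.foldl_max_mem (pvLens s i dict) 0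

lemma pvM_nonneg (s : String) (i : Int) (dict : List String) : 0 ≤ pvM s i dict :=
  (PySem.List.le_foldl_max (pvLens s i dict) 0).1

lemma pvM_ge (s : String) (i : Int) (dict : List String) :
    ∀ y ∈ pvLens s i dict, y ≤ pvM s i dict :=
  (PySem.List.le_foldl_max (pvLens s i dict) 0).2

lemma pvMb_iff (s : String) (i : Int) (w : String) :
    pvMb s i w = true ↔ (i + PySem.Str.len w - 1 < PySem.Str.len s ∧ pvSl s i (PySem.Str.len w) = w) := by
  simp [pvMb]

lemma pvLen_nonneg (w : String) : 0 ≤ PySem.Str.len w := by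
  rw [PySem.Str.len_eq]; exact_mod_cast Nat.zero_le _

lemma pvLen_eq_zero_iff (w : String) : PySem.Str.len w = 0 ↔ w = "" := by
  rw [PySem.Str.len_eq]
  constructor
  · intro h
    apply String.toList_inj.mp
    rw [String.toList_empty]
    exact List.eq_nil_of_length_eq_zero (by exact_mod_cast h)
  · intro h; subst h; simp

lemma pvOne_le_len (w : String) (h : w ≠ "") : 1 ≤ PySem.Str.len w := by
  have h0 := pvLen_nonneg w
  have := (pvLen_eq_zero_iff w).not.mpr h
  omega

lemma pvSl_zero (s : String) (i : Int) : pvSl s i 0 = "" := by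
  apply String.toList_inj.mp
  rw [pvSl, PySem.Str.toList_slice, String.toList_empty, PySem.Chars.slice_eq_listSlice]
  apply List.eq_nil_of_length_eq_zero
  rw [Int.add_zero, PySem.List.length_slice]
  omega

/-- Invariant of A's loop: the state is always (best length so far, the slice of that length). -/
lemma pvA_loop (s : String) (i : Int) (p : List String) : ∀ (M0 : Int), 0 ≤ M0 →
    p.foldl (fun (acc : Int × String) w =>
        if pvMb s i w then
          (if PySem.Str.len w > acc.1 then (PySem.Str.len w, w) else acc)
        else acc) (M0, pvSl s i M0)
    = (((p.filter (pvMb s i)).map PySem.Str.len).foldl max M0,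
       pvSl s i (((p.filter (pvMb s i)).map PySem.Str.len).foldl max M0)) := by
  induction p with
  | nil => intro M0 _; simp
  | cons w rest ih =>
    intro M0 h0
    rw [List.foldl_cons, List.filter_cons]
    by_cases hmb : pvMb s i w = true
    · have hw : pvSl s i (PySem.Str.len w) = w := ((pvMb_iff s i w).mp hmb).2
      by_cases hlt : PySem.Str.len w > M0
      · simp only [hmb, hlt, if_pos]
        rw [List.map_cons, List.foldl_cons, max_eq_right (le_of_lt hlt)]
        have hpair : (PySem.Str.len w, w) = (PySem.Str.len w, pvSl s i (PySem.Str.len w)) := by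
          rw [hw]
        rw [hpair]
        exact ih (PySem.Str.len w) (le_of_lt (lt_of_le_of_lt h0 hlt))
      · simp only [hmb, if_true, hlt]
        rw [List.map_cons, List.foldl_cons, max_eq_left (not_lt.mp hlt)]
        exact ih M0 h0
    · simp only [hmb]
      exact ih M0 h0

lemma pvA_eq_ref (s : String) (i : Int) (dict : List String) :
    check s i dict = pvRef s i dict := by
  have hfun : (fun (acc : Int × String) word =>
      if i + PySem.Str.len word - 1 ≥ PySem.Str.len s then acc
      else if PySem.Str.slice s (some i) (some (i + PySem.Str.len word)) == word then
        (if PySem.Str.len word > acc.1 then (PySem.Str.len word, word) else acc)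
      else acc)
      = (fun (acc : Int × String) w =>
        if pvMb s i w then
          (if PySem.Str.len w > acc.1 then (PySem.Str.len w, w) else acc)
        else acc) := by
    funext acc w
    by_cases hg : i + PySem.Str.len w - 1 ≥ PySem.Str.len s
    · rw [if_pos hg]
      have h0 : pvMb s i w = false := by
        unfold pvMb
        rw [decide_eq_true hg]
        simp
      rw [h0]
      simp
    · rw [if_neg hg]
      by_cases he : (PySem.Str.slice s (some i) (some (i + PySem.Str.len w)) == w) = true
      · rw [if_pos he]
        have h1 : pvMb s i w = true := by
          simp only [pvMb, pvSl, Bool.and_eq_true, Bool.not_eq_true', decide_eq_false_iff_not]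
          exact ⟨hg, he⟩
        rw [h1]
        simp
      · rw [if_neg he]
        rw [Bool.not_eq_true] at he
        have h1 : pvMb s i w = false := by
          unfold pvMb pvSl
          rw [he]
          simp
        rw [h1]
        simp
  show (let st := dict.foldl _ (0, "");
        if st.2 == "" then ("", false) else (st.2, true)) = pvRef s i dict
  rw [hfun]
  have hinit : ((0 : Int), "") = ((0 : Int), pvSl s i 0) := by rw [pvSl_zero]
  rw [hinit, pvA_loop s i dict 0 le_rfl]
  have hM : ((dict.filter (pvMb s i)).map PySem.Str.len).foldl max 0 = pvM s i dict := rfl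
  rw [hM]
  have h0M : 0 ≤ pvM s i dict := pvM_nonneg s i dict
  by_cases hM0 : pvM s i dict ≤ 0
  · have : pvM s i dict = 0 := le_antisymm hM0 h0M
    simp [pvRef, this, pvSl_zero]
  · have hmem : pvM s i dict ∈ pvLens s i dict := by
      rcases PySem.List.foldl_max_mem (pvLens s i dict) 0 with h | h
      · exact absurd (le_of_eq h) hM0
      · exact h
    rcases List.mem_map.mp hmem with ⟨w, hwf, hwl⟩
    rcases List.mem_filter.mp hwf with ⟨_, hwmb⟩
    have hw : pvSl s i (PySem.Str.len w) = w := ((pvMb_iff s i w).mp hwmb).2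
    have hne : pvSl s i (pvM s i dict) ≠ "" := by
      rw [← hwl, hw]
      intro hcon
      have := (pvLen_eq_zero_iff w).mpr hcon
      omega
    simp [pvRef, hM0, hne]

/-- B's loop over a strictly descending list of candidate lengths that contains every
matching length returns the reference value. -/
lemma pvB_loop (s : String) (i : Int) (dict : List String) (LS : List Int)
    (hdesc : LS.Pairwise (fun a b => b < a))
    (hpos : ∀ L ∈ LS, 1 ≤ L)
    (hcomp : ∀ w ∈ dict, pvMb s i w = true → 1 ≤ PySem.Str.len w → PySem.Str.len w ∈ LS) :
    checkAltLoop s i (PySem.Set.ofList dict) LS = pvRef s i dict := by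
  induction LS with
  | nil =>
    have hM : pvM s i dict ≤ 0 := by
      by_contra hc
      rw [not_le] at hc
      have hmem : pvM s i dict ∈ pvLens s i dict := by
        rcases pvM_mem_or s i dict with h | h
        · omega
        · exact h
      rcases List.mem_map.mp hmem with ⟨w, hwf, hwl⟩
      rcases List.mem_filter.mp hwf with ⟨hwd, hwmb⟩
      exact absurd (hcomp w hwd hwmb (by omega)) (List.not_mem_nil)
    simp [checkAltLoop, pvRef, hM]
  | cons L0 rest ih =>
    have hdesc' := List.Pairwise.of_cons hdesc
    have hhead : ∀ x ∈ rest, x < L0 := fun x hx => List.rel_of_pairwise_cons hdesc hx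
    by_cases hg : i + L0 - 1 < PySem.Str.len s
    · rw [checkAltLoop, if_pos hg]
      by_cases ht : (PySem.Str.len (PySem.Str.slice s (some i) (some (i + L0))) == L0
          && PySem.Set.contains (PySem.Set.ofList dict) (PySem.Str.slice s (some i) (some (i + L0)))) = true
      · rw [if_pos ht]
        rcases Bool.and_eq_true_iff.mp ht with ⟨hlen, hcont⟩
        have hlen' : PySem.Str.len (pvSl s i L0) = L0 := by exact_mod_cast (beq_iff_eq).mp hlen
        have hmem : pvSl s i L0 ∈ dict :=
          (PySem.Set.mem_ofList dict _).mp ((PySem.Set.contains_iff _ _).mp hcont)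
        have hmb : pvMb s i (pvSl s i L0) = true := by
          rw [pvMb_iff, hlen']
          exact ⟨hg, rfl⟩
        have hL0pos : 1 ≤ L0 := hpos L0 List.mem_cons_self
        have hinlens : L0 ∈ pvLens s i dict := by
          rw [← hlen']
          exact List.mem_map.mpr ⟨pvSl s i L0, List.mem_filter.mpr ⟨hmem, hmb⟩, rfl⟩
        have hle : L0 ≤ pvM s i dict := pvM_ge s i dict L0 hinlens
        have hge : pvM s i dict ≤ L0 := by
          rcases pvM_mem_or s i dict with h | h
          · omega
          · rcases List.mem_map.mp h with ⟨w, hwf, hwl⟩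
            rcases List.mem_filter.mp hwf with ⟨hwd, hwmb⟩
            have : pvM s i dict ∈ L0 :: rest := by
              rw [← hwl]; exact hcomp w hwd hwmb (by omega)
            rcases List.mem_cons.mp this with h' | h'
            · omega
            · exact absurd hle (not_le.mpr (hhead _ h'))
        have hMeq : pvM s i dict = L0 := le_antisymm hge hle
        rw [pvRef, if_neg (by omega), hMeq]
        rfl
      · rw [if_neg ht]
        apply ih hdesc' (fun L hL => hpos L (List.mem_cons_of_mem _ hL))
        intro w hwd hwmb hwpos
        have hin := hcomp w hwd hwmb hwpos
        rcases List.mem_cons.mp hin with h' | h'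
        · exfalso
          have hw : pvSl s i (PySem.Str.len w) = w := ((pvMb_iff s i w).mp hwmb).2
          apply ht
          have hw' : PySem.Str.slice s (some i) (some (i + PySem.Str.len w)) = w := hw
          rw [← h', hw']
          apply Bool.and_eq_true_iff.mpr
          refine ⟨(beq_iff_eq).mpr rfl, ?_⟩
          exact (PySem.Set.contains_iff _ _).mpr ((PySem.Set.mem_ofList dict w).mpr hwd)
        · exact h'
    · rw [checkAltLoop, if_neg hg]
      apply ih hdesc' (fun L hL => hpos L (List.mem_cons_of_mem _ hL))
      intro w hwd hwmb hwpos
      have hin := hcomp w hwd hwmb hwpos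
      rcases List.mem_cons.mp hin with h' | h'
      · exfalso
        have := ((pvMb_iff s i w).mp hwmb).1
        rw [h'] at this
        exact hg this
      · exact h'

lemma pvB_eq_ref (s : String) (i : Int) (dict : List String) :
    check_alt s i dict = pvRef s i dict := by
  show checkAltLoop s i (PySem.Set.ofList dict)
      (PySem.List.sorted (PySem.Set.ofList
        (((PySem.Set.ofList dict).filter (fun w => !(w == ""))).map PySem.Str.len)) (fun x => x) true)
      = pvRef s i dict
  set base : List Int := PySem.Set.ofList
      (((PySem.Set.ofList dict).filter (fun w => !(w == ""))).map PySem.Str.len) with hbase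
  set LS : List Int := PySem.List.sorted base (fun x => x) true with hLS
  have hmemLS : ∀ L : Int, L ∈ LS ↔ (∃ w, w ∈ dict ∧ w ≠ "" ∧ PySem.Str.len w = L) := by
    intro L
    rw [hLS, PySem.List.mem_sorted, hbase, PySem.Set.mem_ofList, List.mem_map]
    constructor
    · rintro ⟨w, hwf, hwl⟩
      rcases List.mem_filter.mp hwf with ⟨hwm, hwe⟩
      refine ⟨w, (PySem.Set.mem_ofList dict w).mp hwm, ?_, hwl⟩
      simpa using hwe
    · rintro ⟨w, hwd, hwe, hwl⟩
      exact ⟨w, List.mem_filter.mpr ⟨(PySem.Set.mem_ofList dict w).mpr hwd, by simpa using hwe⟩, hwl⟩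
  apply pvB_loop
  · have h1 := PySem.List.sorted_pairwise_rev base (fun x => x)
    have hnd : LS.Nodup := ((PySem.List.sorted_perm base (fun x => x) true).symm).nodup
      (PySem.Set.nodup_ofList _)
    exact (h1.and hnd).imp (by intro a b hab; rcases hab with ⟨hle, hne⟩; omega)
  · intro L hL
    rcases (hmemLS L).mp hL with ⟨w, _, hwe, hwl⟩
    rw [← hwl]
    exact pvOne_le_len w hwe
  · intro w hwd hwmb hwpos
    apply (hmemLS (PySem.Str.len w)).mpr
    refine ⟨w, hwd, ?_, rfl⟩
    intro hcon
    have := (pvLen_eq_zero_iff w).mpr hcon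
    omega

-- ===== VERDICT (by name: the statement is the Claim_ definition above) =====
theorem check_spec : Claim_equal_check := by
  intro s i dict _
  show check s i dict = check_alt s i dict
  rw [pvA_eq_ref, pvB_eq_ref]
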